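-- pv_equiv track=rewrite | github.com/Aziz-Rakhimov/quranic-recitation-assessment | generate_final_reports.py | phoneme_word_index
-- ===== SOURCE A (Python) =====
-- def phoneme_word_index(pos, word_boundaries, total):
--     """Return the 0-based word index for a phoneme position."""
--     boundaries = sorted(word_boundaries)
--     word_starts = [0] + boundaries
--     for i, start in enumerate(word_starts):
--         end = boundaries[i] if i < len(boundaries) else total
--         if start <= pos < end:
--             return i
--     return len(word_starts) - 1
-- ===== SOURCE B (Python) =====
-- import bisect
--
--
-- def phoneme_word_index(pos, word_boundaries, total):
--     """Return the 0-based word index for a phoneme position."""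
--     boundaries = sorted(word_boundaries)
--     idx = bisect.bisect_right(boundaries, pos)
--     start = boundaries[idx - 1] if idx > 0 else 0
--     end = boundaries[idx] if idx < len(boundaries) else total
--     return idx if start <= pos < end else len(boundaries)
-- ===== Notes on version B (the rewrite author's own statement) =====
-- stated objective: idiomatic
-- what changed: Replaced A's linear enumerate scan over word-start intervals with a single bisect_right lookup into the sorted boundary list plus one bounds check.
import Mathlib
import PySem

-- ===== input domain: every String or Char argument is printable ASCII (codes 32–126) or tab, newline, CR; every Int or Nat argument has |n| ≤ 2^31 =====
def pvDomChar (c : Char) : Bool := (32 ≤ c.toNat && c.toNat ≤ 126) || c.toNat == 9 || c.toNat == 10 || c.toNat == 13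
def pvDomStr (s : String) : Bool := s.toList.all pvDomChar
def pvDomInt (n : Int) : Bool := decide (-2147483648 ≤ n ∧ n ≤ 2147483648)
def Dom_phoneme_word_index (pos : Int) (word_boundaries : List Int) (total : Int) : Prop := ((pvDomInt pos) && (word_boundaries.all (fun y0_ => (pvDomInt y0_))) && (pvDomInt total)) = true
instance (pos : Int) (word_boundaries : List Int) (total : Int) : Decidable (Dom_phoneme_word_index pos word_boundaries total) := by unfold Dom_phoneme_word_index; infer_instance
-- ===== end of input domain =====

-- B replaces A's linear scan over word intervals with a single bisect_right lookup
-- into the sorted boundary list (alternative decomposition; same exact results).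

-- ===== PORT A =====
-- "for i, start in enumerate(word_starts): end = …; if start <= pos < end: return i"
def pwiLoop (b : List Int) (total pos : Int) : Nat → List Int → Option Nat
  | _, [] => none
  | i, start :: rest =>
    let endv := if i < b.length then b.getD i 0 else total
    if start ≤ pos ∧ pos < endv then some i else pwiLoop b total pos (i + 1) rest

def phoneme_word_index (pos : Int) (word_boundaries : List Int) (total : Int) : Int :=
  let boundaries := PySem.List.sorted word_boundaries (fun x => x)
  let word_starts := 0 :: boundaries
  match pwiLoop boundaries total pos 0 word_starts with
  | some i => (i : Int)
  | none => (word_starts.length : Int) - 1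

-- ===== PORT B =====
def phoneme_word_index_alt (pos : Int) (word_boundaries : List Int) (total : Int) : Int :=
  let boundaries := PySem.List.sorted word_boundaries (fun x => x)
  let idx := PySem.List.bisectRight boundaries pos
  let start := if 0 < idx then boundaries.getD (idx - 1) 0 else 0
  let endv := if idx < boundaries.length then boundaries.getD idx 0 else total
  if start ≤ pos ∧ pos < endv then (idx : Int) else (boundaries.length : Int)

-- ===== PRECONDITION & SPEC =====
def Spec_phoneme_word_index (pos : Int) (word_boundaries : List Int) (total : Int) (out : Int) : Prop := out = phoneme_word_index_alt pos word_boundaries total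
instance (pos : Int) (word_boundaries : List Int) (total : Int) (out : Int) : Decidable (Spec_phoneme_word_index pos word_boundaries total out) := by unfold Spec_phoneme_word_index; infer_instance

-- ===== CLAIM (what is proved, stated in full; the proofs are below) =====
def Claim_equal_phoneme_word_index : Prop := ∀ (pos : Int) (word_boundaries : List Int) (total : Int), Dom_phoneme_word_index pos word_boundaries total → Spec_phoneme_word_index pos word_boundaries total (phoneme_word_index pos word_boundaries total)

-- ===== LEMMAS AND PROOFS =====

lemma pwiLoop_none (b : List Int) (total pos : Int) :
    ∀ (l : List Int) (i : Nat),
      (∀ j, j < l.length →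
        ¬ (l.getD j 0 ≤ pos ∧ pos < (if i + j < b.length then b.getD (i + j) 0 else total))) →
      pwiLoop b total pos i l = none := by
  intro l
  induction l with
  | nil => intro i _; rfl
  | cons x xs ih =>
    intro i h
    have h0 := h 0 (by simp)
    simp only [List.getD_cons_zero, Nat.add_zero] at h0
    simp only [pwiLoop]
    rw [if_neg h0]
    apply ih
    intro j hj
    have := h (j + 1) (by simpa using Nat.succ_lt_succ hj)
    simpa [Nat.add_assoc, Nat.add_comm 1 j] using this

lemma pwiLoop_some (b : List Int) (total pos : Int) :
    ∀ (l : List Int) (i k : Nat), k < l.length →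
      (l.getD k 0 ≤ pos ∧ pos < (if i + k < b.length then b.getD (i + k) 0 else total)) →
      (∀ j, j < k →
        ¬ (l.getD j 0 ≤ pos ∧ pos < (if i + j < b.length then b.getD (i + j) 0 else total))) →
      pwiLoop b total pos i l = some (i + k) := by
  intro l
  induction l with
  | nil => intro i k hk; simp at hk
  | cons x xs ih =>
    intro i k hk hhit hbefore
    cases k with
    | zero =>
      simp only [List.getD_cons_zero, Nat.add_zero] at hhit
      simp only [pwiLoop]
      rw [if_pos hhit]
      simp
    | succ k' =>
      have hfail := hbefore 0 (Nat.succ_pos _)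
      simp only [List.getD_cons_zero, Nat.add_zero] at hfail
      simp only [pwiLoop]
      rw [if_neg hfail]
      have := ih (i + 1) k' (by simpa using Nat.lt_of_succ_lt_succ hk)
        (by simpa [Nat.add_assoc, Nat.add_comm 1 k'] using hhit)
        (by
          intro j hj
          have := hbefore (j + 1) (Nat.succ_lt_succ hj)
          simpa [Nat.add_assoc, Nat.add_comm 1 j] using this)
      rw [this]
      congr 1
      omega

lemma getD_cons_of_pos (x : Int) (l : List Int) (k : Nat) (h : 0 < k) :
    (x :: l).getD k 0 = l.getD (k - 1) 0 := by
  obtain ⟨k', rfl⟩ : ∃ k', k = k' + 1 := ⟨k - 1, by omega⟩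
  simp

-- ===== VERDICT (by name: the statement is the Claim_ definition above) =====
theorem phoneme_word_index_spec : Claim_equal_phoneme_word_index := by
  intro pos wb total _
  unfold Spec_phoneme_word_index phoneme_word_index phoneme_word_index_alt
  set b := PySem.List.sorted wb (fun x => x) with hb
  obtain ⟨hkle, hlt, hge⟩ := PySem.List.bisectRight_spec b pos
    (by simpa using PySem.List.sorted_pairwise wb (fun x => x))
  set k := PySem.List.bisectRight b pos with hk
  set start := if 0 < k then b.getD (k - 1) 0 else 0 with hstart
  set endv := if k < b.length then b.getD k 0 else total with hendv
  have hws : ((0 : Int) :: b).getD k 0 = start := by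
    rcases Nat.eq_zero_or_pos k with h0 | h0
    · simp [hstart, h0]
    · rw [getD_cons_of_pos _ _ _ h0, hstart, if_pos h0]
  by_cases hc : start ≤ pos ∧ pos < endv
  · -- hit at index k
    have hloop : pwiLoop b total pos 0 ((0 : Int) :: b) = some (0 + k) := by
      apply pwiLoop_some
      · simpa using Nat.lt_succ_of_le hkle
      · simp only [Nat.zero_add]
        rw [hws, ← hendv]
        exact hc
      · intro j hj hbad
        simp only [Nat.zero_add] at hbad
        have hjn : j < b.length := lt_of_lt_of_le hj hkle
        rw [if_pos hjn, List.getD_eq_getElem b 0 hjn] at hbad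
        exact absurd hbad.2 (not_lt.mpr (hlt j hjn hj))
    simp only [hloop, Nat.zero_add]
    rw [if_pos hc]
  · -- no interval matches: both return len(boundaries)
    have hloop : pwiLoop b total pos 0 ((0 : Int) :: b) = none := by
      apply pwiLoop_none
      intro j hj hbad
      simp only [Nat.zero_add] at hbad
      rcases lt_trichotomy j k with hjk | hjk | hjk
      · have hjn : j < b.length := lt_of_lt_of_le hjk hkle
        rw [if_pos hjn, List.getD_eq_getElem b 0 hjn] at hbad
        exact absurd hbad.2 (not_lt.mpr (hlt j hjn hjk))
      · subst hjk
        rw [hws, ← hendv] at hbad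
        exact hc hbad
      · -- j > k: interval j starts at b[j-1] ≥ b[k] > pos
        obtain ⟨j', rfl⟩ : ∃ j', j = j' + 1 := ⟨j - 1, by omega⟩
        have hj'n : j' < b.length := by simpa using Nat.lt_of_succ_lt_succ hj
        have hpos : pos < b[j'] := hge j' hj'n (by omega)
        rw [getD_cons_of_pos, Nat.add_sub_cancel, List.getD_eq_getElem b 0 hj'n] at hbad
        · exact absurd hbad.1 (not_le.mpr hpos)
        · omega
    simp only [hloop]
    rw [if_neg hc]
    simp
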